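-- pv_equiv track=rewrite | github.com/Kalaimagal09/SafeHire_AI | Safe_Hire_AI/main.py | get_violation_details
-- ===== SOURCE A (Python) =====
-- def get_violation_details(text: str):
--     text = text.lower()
--     if any(word in text for word in ["age", "birth", "retire", "old", "young"]):
--         return "Age Discrimination", "If hired, can you furnish proof of age?"
--     elif any(word in text for word in ["married", "kids", "children", "child", "pregnant", "maiden", "mrs", "miss"]):
--         return "Marital/Family Status", "Can you meet the specified work schedule?"
--     elif any(word in text for word in ["citizen", "country", "born", "language", "nationality"]):
--         return "National Origin/Citizenship", "Do you have the legal right to work in the U.S.?"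
--     elif any(word in text for word in ["handicap", "disability", "medical", "health"]):
--         return "Disability/Health", "How would you perform this particular task?"
--     elif any(word in text for word in ["religion", "church", "pastor"]):
--         return "Religion/Creed", "Can you work the required days and shifts?"
--     else:
--         return "General Compliance Violation", "Please focus questions strictly on job-related duties."
-- ===== SOURCE B (Python) =====
-- # Flat keyword->priority map; compute the minimum matched priority, then look the
-- # outcome up in a table (no early-exit branch chain).
-- KEYWORD_PRIORITY = {
--     "age": 0, "birth": 0, "retire": 0, "old": 0, "young": 0,
--     "married": 1, "kids": 1, "children": 1, "child": 1, "pregnant": 1,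
--     "maiden": 1, "mrs": 1, "miss": 1,
--     "citizen": 2, "country": 2, "born": 2, "language": 2, "nationality": 2,
--     "handicap": 3, "disability": 3, "medical": 3, "health": 3,
--     "religion": 4, "church": 4, "pastor": 4,
-- }
--
-- OUTCOMES = [
--     ("Age Discrimination", "If hired, can you furnish proof of age?"),
--     ("Marital/Family Status", "Can you meet the specified work schedule?"),
--     ("National Origin/Citizenship", "Do you have the legal right to work in the U.S.?"),
--     ("Disability/Health", "How would you perform this particular task?"),
--     ("Religion/Creed", "Can you work the required days and shifts?"),
--     ("General Compliance Violation", "Please focus questions strictly on job-related duties."),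
-- ]
--
-- def get_violation_details(text: str):
--     t = text.lower()
--     best = min((p for w, p in KEYWORD_PRIORITY.items() if w in t),
--                default=len(OUTCOMES) - 1)
--     return OUTCOMES[best]
-- ===== Notes on version B (the rewrite author's own statement) =====
-- stated objective: alternative
-- what changed: Instead of an early-exit if/elif chain over keyword groups, B scans one flat keyword-to-priority map, aggregates the minimum matched priority over all keywords, and looks the result up in an outcome table.
import Mathlib
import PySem

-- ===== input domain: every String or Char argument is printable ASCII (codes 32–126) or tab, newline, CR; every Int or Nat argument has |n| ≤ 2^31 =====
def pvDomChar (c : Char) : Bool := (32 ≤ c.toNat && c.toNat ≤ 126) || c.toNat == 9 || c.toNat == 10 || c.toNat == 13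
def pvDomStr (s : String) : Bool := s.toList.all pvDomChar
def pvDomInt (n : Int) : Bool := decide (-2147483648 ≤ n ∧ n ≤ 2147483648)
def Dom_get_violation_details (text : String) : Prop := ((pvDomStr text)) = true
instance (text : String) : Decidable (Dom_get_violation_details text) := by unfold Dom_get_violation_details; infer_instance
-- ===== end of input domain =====

-- ===== PORT A =====
-- B aggregates a flat keyword->priority map by minimum instead of A's early-exit branch chain (objective: alternative).
def get_violation_details (text : String) : String × String :=
  let t := PySem.Str.lower text
  if ["age", "birth", "retire", "old", "young"].any (fun w => PySem.Str.isIn w t) then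
    ("Age Discrimination", "If hired, can you furnish proof of age?")
  else if ["married", "kids", "children", "child", "pregnant", "maiden", "mrs", "miss"].any (fun w => PySem.Str.isIn w t) then
    ("Marital/Family Status", "Can you meet the specified work schedule?")
  else if ["citizen", "country", "born", "language", "nationality"].any (fun w => PySem.Str.isIn w t) then
    ("National Origin/Citizenship", "Do you have the legal right to work in the U.S.?")
  else if ["handicap", "disability", "medical", "health"].any (fun w => PySem.Str.isIn w t) then
    ("Disability/Health", "How would you perform this particular task?")
  else if ["religion", "church", "pastor"].any (fun w => PySem.Str.isIn w t) then
    ("Religion/Creed", "Can you work the required days and shifts?")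
  else
    ("General Compliance Violation", "Please focus questions strictly on job-related duties.")

-- ===== PORT B =====
def pvKeywordPriority : List (String × Nat) :=
  [("age", 0), ("birth", 0), ("retire", 0), ("old", 0), ("young", 0),
   ("married", 1), ("kids", 1), ("children", 1), ("child", 1), ("pregnant", 1),
   ("maiden", 1), ("mrs", 1), ("miss", 1),
   ("citizen", 2), ("country", 2), ("born", 2), ("language", 2), ("nationality", 2),
   ("handicap", 3), ("disability", 3), ("medical", 3), ("health", 3),
   ("religion", 4), ("church", 4), ("pastor", 4)]

def pvOutcomes : List (String × String) :=
  [("Age Discrimination", "If hired, can you furnish proof of age?"),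
   ("Marital/Family Status", "Can you meet the specified work schedule?"),
   ("National Origin/Citizenship", "Do you have the legal right to work in the U.S.?"),
   ("Disability/Health", "How would you perform this particular task?"),
   ("Religion/Creed", "Can you work the required days and shifts?"),
   ("General Compliance Violation", "Please focus questions strictly on job-related duties.")]

-- Source B's min(... , default=len(OUTCOMES)-1) ported as a fold taking min of matched priorities;
-- OUTCOMES[best] ported as getD (exact: best ≤ 5 < 6 = pvOutcomes.length always).
def get_violation_details_alt (text : String) : String × String :=
  let t := PySem.Str.lower text
  let best := pvKeywordPriority.foldl
    (fun a wp => if PySem.Str.isIn wp.1 t then min a wp.2 else a)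
    (pvOutcomes.length - 1)
  pvOutcomes.getD best ("", "")

-- ===== PRECONDITION & SPEC =====
def Spec_get_violation_details (text : String) (out : String × String) : Prop := out = get_violation_details_alt text
instance (text : String) (out : String × String) : Decidable (Spec_get_violation_details text out) := by unfold Spec_get_violation_details; infer_instance

-- ===== CLAIM (what is proved, stated in full; the proofs are below) =====
def Claim_equal_get_violation_details : Prop := ∀ (text : String), Dom_get_violation_details text → Spec_get_violation_details text (get_violation_details text)

-- ===== LEMMAS AND PROOFS =====

-- min-fold over a block of keywords that all carry the same priority
theorem pvFold_const_block (t : String) (p acc : Nat) (ws : List String) :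
    (ws.map (fun w => (w, p))).foldl
      (fun a (wp : String × Nat) => if PySem.Str.isIn wp.1 t then min a wp.2 else a) acc
    = if ws.any (fun w => PySem.Str.isIn w t) then min acc p else acc := by
  induction ws generalizing acc with
  | nil => simp
  | cons w rest ih =>
    simp only [List.map_cons, List.foldl_cons, List.any_cons]
    rw [ih]
    rcases Bool.dichotomy (PySem.Str.isIn w t) with h1 | h1 <;>
      rcases Bool.dichotomy (rest.any fun w => PySem.Str.isIn w t) with h2 | h2 <;>
      simp only [h1, h2, Bool.false_or, Bool.true_or, Bool.or_false, Bool.or_true] <;>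
      simp [min_assoc]

theorem pvTable_split :
    pvKeywordPriority =
      (["age", "birth", "retire", "old", "young"].map (fun w => (w, 0))) ++
      (["married", "kids", "children", "child", "pregnant", "maiden", "mrs", "miss"].map (fun w => (w, 1))) ++
      (["citizen", "country", "born", "language", "nationality"].map (fun w => (w, 2))) ++
      (["handicap", "disability", "medical", "health"].map (fun w => (w, 3))) ++
      (["religion", "church", "pastor"].map (fun w => (w, 4))) := rfl

-- ===== VERDICT (by name: the statement is the Claim_ definition above) =====
theorem get_violation_details_spec : Claim_equal_get_violation_details := by
  intro text _
  unfold Spec_get_violation_details get_violation_details get_violation_details_alt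
  rw [pvTable_split]
  simp only [List.foldl_append, pvFold_const_block]
  rcases Bool.dichotomy (["age", "birth", "retire", "old", "young"].any
      (fun w => PySem.Str.isIn w (PySem.Str.lower text))) with h0 | h0 <;>
    rcases Bool.dichotomy (["married", "kids", "children", "child", "pregnant", "maiden", "mrs", "miss"].any
      (fun w => PySem.Str.isIn w (PySem.Str.lower text))) with h1 | h1 <;>
    rcases Bool.dichotomy (["citizen", "country", "born", "language", "nationality"].any
      (fun w => PySem.Str.isIn w (PySem.Str.lower text))) with h2 | h2 <;>
    rcases Bool.dichotomy (["handicap", "disability", "medical", "health"].any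
      (fun w => PySem.Str.isIn w (PySem.Str.lower text))) with h3 | h3 <;>
    rcases Bool.dichotomy (["religion", "church", "pastor"].any
      (fun w => PySem.Str.isIn w (PySem.Str.lower text))) with h4 | h4 <;>
    simp only [h0, h1, h2, h3, h4] <;> rfl
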